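-- pv_equiv track=rewrite | github.com/gustin33/project_euler | 001-100/Problem 025/Problem 25.py | first_fib_num_to_have_x_digits
-- ===== SOURCE A (Python) =====
-- def first_fib_num_to_have_x_digits(x):
--     n = 2
--     flist = [1, 1]
--     while flist[-1] < 10**(x-1):
--         flist.append(flist[0] + flist[1])
--         del flist[0]
--         n += 1
--     return "F_{} = {}".format(n, flist[-1])
-- ===== SOURCE B (Python) =====
-- def first_fib_num_to_have_x_digits(x):
--     # fast-doubling Fibonacci: fd(n) = (F(n), F(n+1))
--     def fd(n):
--         if n == 0:
--             return (0, 1)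
--         a, b = fd(n >> 1)
--         c = a * (2 * b - a)
--         d = a * a + b * b
--         return (d, c + d) if n & 1 else (c, d)
--
--     if x <= 1:
--         return "F_2 = 1"
--     t = 10 ** (x - 1)
--     hi = 2
--     while fd(hi)[0] < t:
--         hi *= 2
--     lo = hi // 2
--     while lo < hi:
--         mid = (lo + hi) // 2
--         if fd(mid)[0] < t:
--             lo = mid + 1
--         else:
--             hi = mid
--     return "F_{} = {}".format(lo, fd(lo)[0])
-- ===== Notes on version B (the rewrite author's own statement) =====
-- stated objective: faster
-- what changed: Replaces A's one-step Fibonacci iteration (one big-int addition per index until the threshold is reached) by fast-doubling Fibonacci combined with an exponential search then binary search on the index of the first Fibonacci number >= 10**(x-1).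
import Mathlib
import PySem

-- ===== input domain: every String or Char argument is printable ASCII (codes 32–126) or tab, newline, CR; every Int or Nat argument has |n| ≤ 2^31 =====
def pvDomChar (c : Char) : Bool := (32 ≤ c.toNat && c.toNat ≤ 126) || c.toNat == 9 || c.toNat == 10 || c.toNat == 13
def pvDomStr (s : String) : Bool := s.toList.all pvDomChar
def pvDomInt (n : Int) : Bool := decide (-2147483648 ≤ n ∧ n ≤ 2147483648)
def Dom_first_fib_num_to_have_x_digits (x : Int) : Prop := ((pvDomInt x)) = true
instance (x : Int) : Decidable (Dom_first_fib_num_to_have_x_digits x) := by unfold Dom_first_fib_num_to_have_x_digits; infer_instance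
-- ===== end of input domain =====

-- B replaces A's one-step Fibonacci iteration (O(x) big-int additions) by fast-doubling
-- Fibonacci with an exponential + binary search on the index; return value only, no side effects.

-- ===== PORT A =====
-- A's while-loop. flist is always a 2-element list [a, b] of consecutive Fibonacci numbers
-- (so a, b ≥ 1); we store a = a'+1, b = b'+1 so that the measure t - b' strictly decreases.
def pvLoopA (t : Nat) (a' b' n : Nat) : Nat × Nat :=
  if b' + 1 < t then pvLoopA t b' (a' + b' + 1) (n + 1) else (n, b' + 1)
termination_by t - b'
decreasing_by omega

def first_fib_num_to_have_x_digits (x : Int) : String :=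
  -- Python's 10**(x-1) is an int for x ≥ 1; for x ≤ 0 it is a float in (0, 1], and since
  -- flist[-1] ≥ 1 the loop test is then always False — the same as integer threshold 0 (exact).
  let t : Nat := if 1 ≤ x then 10 ^ (x - 1).toNat else 0
  let r := pvLoopA t 0 0 2
  "F_" ++ PySem.Int.toStr (Int.ofNat r.1) ++ " = " ++ PySem.Int.toStr (Int.ofNat r.2)

-- ===== PORT B =====
-- needed by pvExpS's termination proof (cited in its decreasing_by)
theorem pvFibLower (n : Nat) : n ≤ Nat.fib (n + 2) := by
  induction n with
  | zero => simp
  | succ n ih =>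
    have h : Nat.fib (n + 3) = Nat.fib (n + 1) + Nat.fib (n + 2) := Nat.fib_add_two
    have hp : 0 < Nat.fib (n + 1) := Nat.fib_pos.mpr (Nat.succ_pos n)
    show n + 1 ≤ Nat.fib (n + 3)
    omega

-- fast doubling: pvFd n = (F(n), F(n+1))
def pvFd (n : Nat) : Nat × Nat :=
  if n = 0 then (0, 1)
  else
    let p := pvFd (n / 2)
    let c := p.1 * (2 * p.2 - p.1)
    let d := p.1 * p.1 + p.2 * p.2
    if n % 2 = 1 then (d, c + d) else (c, d)
termination_by n
decreasing_by omega

-- needed by pvExpS's termination proof (cited in its decreasing_by)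
theorem pvFd_eq (n : Nat) : pvFd n = (Nat.fib n, Nat.fib (n + 1)) := by
  induction n using Nat.strong_induction_on with
  | _ n ih =>
    unfold pvFd
    split
    · next h => subst h; simp
    · next h =>
      rw [ih (n / 2) (by omega)]
      rcases Nat.even_or_odd n with he | ho
      · obtain ⟨m, hm⟩ := he
        obtain rfl : n = 2 * m := by omega
        have hdiv : 2 * m / 2 = m := by omega
        rw [hdiv, if_neg (by omega)]
        simp only [Prod.mk.injEq]
        constructor
        · exact (Nat.fib_two_mul m).symm
        · rw [Nat.fib_two_mul_add_one, pow_two, pow_two]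
          exact Nat.add_comm _ _
      · obtain ⟨m, hm⟩ := ho
        obtain rfl : n = 2 * m + 1 := by omega
        have hdiv : (2 * m + 1) / 2 = m := by omega
        rw [hdiv, if_pos (by omega)]
        have h3 : Nat.fib (2 * m + 1 + 1) = Nat.fib (2 * m) + Nat.fib (2 * m + 1) :=
          Nat.fib_add_two
        simp only [Prod.mk.injEq]
        constructor
        · rw [Nat.fib_two_mul_add_one, pow_two, pow_two]
          exact Nat.add_comm _ _
        · rw [h3]
          congr 1
          · exact (Nat.fib_two_mul m).symm
          · rw [Nat.fib_two_mul_add_one, pow_two, pow_two]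
            exact Nat.add_comm _ _

-- exponential search: Python's `hi = 2; while fd(hi)[0] < t: hi *= 2`; hi is stored as h + 2
-- so that the measure t - h works (h ≤ fib (h+2) < t whenever the loop continues).
def pvExpS (t h : Nat) : Nat :=
  if (pvFd (h + 2)).1 < t then pvExpS t (2 * h + 2) else h + 2
termination_by t - h
decreasing_by
  next hlt =>
    rw [pvFd_eq] at hlt
    have := pvFibLower h
    omega

-- binary search: Python's `while lo < hi: ...`
def pvBsearch (t lo hi : Nat) : Nat :=
  if lo < hi then
    let mid := (lo + hi) / 2
    if (pvFd mid).1 < t then pvBsearch t (mid + 1) hi else pvBsearch t lo mid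
  else lo
termination_by hi - lo
decreasing_by all_goals omega

def first_fib_num_to_have_x_digits_alt (x : Int) : String :=
  if x ≤ 1 then "F_2 = 1"
  else
    let t := 10 ^ (x - 1).toNat
    let hi := pvExpS t 0
    let lo := hi / 2
    let n := pvBsearch t lo hi
    "F_" ++ PySem.Int.toStr (Int.ofNat n) ++ " = " ++ PySem.Int.toStr (Int.ofNat (pvFd n).1)

-- ===== PRECONDITION & SPEC =====
def Spec_first_fib_num_to_have_x_digits (x : Int) (out : String) : Prop := out = first_fib_num_to_have_x_digits_alt x
instance (x : Int) (out : String) : Decidable (Spec_first_fib_num_to_have_x_digits x out) := by unfold Spec_first_fib_num_to_have_x_digits; infer_instance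

-- ===== CLAIM (what is proved, stated in full; the proofs are below) =====
def Claim_equal_first_fib_num_to_have_x_digits : Prop := ∀ (x : Int), Dom_first_fib_num_to_have_x_digits x → Spec_first_fib_num_to_have_x_digits x (first_fib_num_to_have_x_digits x)

-- ===== LEMMAS AND PROOFS =====

-- the least index n (necessarily ≥ 2) with t ≤ fib n, as 2 + the least k with t ≤ fib (k+2)
def pvMinIdx (t : Nat) : Nat := Nat.find (⟨t, pvFibLower t⟩ : ∃ k, t ≤ Nat.fib (k + 2)) + 2

theorem pvMinIdx_ge (t : Nat) : t ≤ Nat.fib (pvMinIdx t) :=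
  Nat.find_spec (⟨t, pvFibLower t⟩ : ∃ k, t ≤ Nat.fib (k + 2))

theorem pvMinIdx_lt (t m : Nat) (h2 : 2 ≤ m) (hm : m < pvMinIdx t) : Nat.fib m < t := by
  obtain ⟨k, rfl⟩ : ∃ k, m = k + 2 := ⟨m - 2, by omega⟩
  have := Nat.find_min (⟨t, pvFibLower t⟩ : ∃ k, t ≤ Nat.fib (k + 2))
    (m := k) (by unfold pvMinIdx at hm; omega)
  omega

theorem pvMinIdx_unique (t n : Nat) (h2 : 2 ≤ n) (hn : t ≤ Nat.fib n)
    (hmin : ∀ m, 2 ≤ m → m < n → Nat.fib m < t) : pvMinIdx t = n := by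
  rcases lt_trichotomy (pvMinIdx t) n with h | h | h
  · have := hmin (pvMinIdx t) (by unfold pvMinIdx; omega) h
    have := pvMinIdx_ge t
    omega
  · exact h
  · have := pvMinIdx_lt t n h2 h
    omega

theorem pvLoopA_eq (t : Nat) (a' b' n : Nat) (hn : 2 ≤ n)
    (ha : Nat.fib (n - 1) = a' + 1) (hb : Nat.fib n = b' + 1)
    (hmin : ∀ m, 2 ≤ m → m < n → Nat.fib m < t) :
    pvLoopA t a' b' n = (pvMinIdx t, Nat.fib (pvMinIdx t)) := by
  have H : ∀ k a' b' n, t - b' ≤ k → 2 ≤ n →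
      Nat.fib (n - 1) = a' + 1 → Nat.fib n = b' + 1 →
      (∀ m, 2 ≤ m → m < n → Nat.fib m < t) →
      pvLoopA t a' b' n = (pvMinIdx t, Nat.fib (pvMinIdx t)) := by
    intro k
    induction k with
    | zero =>
      intro a' b' n hk hn ha hb hmin
      unfold pvLoopA
      rw [if_neg (by omega)]
      have : pvMinIdx t = n := pvMinIdx_unique t n hn (by omega) hmin
      rw [this, hb]
    | succ k ih =>
      intro a' b' n hk hn ha hb hmin
      unfold pvLoopA
      split
      · next hlt =>
        apply ih b' (a' + b' + 1) (n + 1) (by omega) (by omega)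
        · simpa using hb
        · have h := Nat.fib_add_two (n := n - 1)
          have e1 : n - 1 + 2 = n + 1 := by omega
          have e2 : n - 1 + 1 = n := by omega
          rw [e1, e2] at h
          omega
        · intro m hm2 hmlt
          rcases Nat.lt_or_ge m n with h | h
          · exact hmin m hm2 h
          · have hmn : m = n := by omega
            rw [hmn]
            omega
      · next hge =>
        have : pvMinIdx t = n := pvMinIdx_unique t n hn (by omega) hmin
        rw [this, hb]
  exact H (t - b') a' b' n le_rfl hn ha hb hmin

theorem pvExpS_spec (t : Nat) (h : Nat) (hinv : Nat.fib ((h + 2) / 2) < t)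
    (heven : h % 2 = 0) :
    t ≤ Nat.fib (pvExpS t h) ∧ Nat.fib ((pvExpS t h) / 2) < t ∧ (pvExpS t h) % 2 = 0 := by
  have H : ∀ k h, t - h ≤ k → Nat.fib ((h + 2) / 2) < t → h % 2 = 0 →
      t ≤ Nat.fib (pvExpS t h) ∧ Nat.fib ((pvExpS t h) / 2) < t ∧ (pvExpS t h) % 2 = 0 := by
    intro k
    induction k with
    | zero =>
      intro h hk hinv heven
      have hlow := pvFibLower h
      unfold pvExpS
      rw [pvFd_eq]
      rw [if_neg (by simp; omega)]
      refine ⟨by omega, hinv, by omega⟩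
    | succ k ih =>
      intro h hk hinv heven
      unfold pvExpS
      rw [pvFd_eq]
      split
      · next hlt =>
        have hlow := pvFibLower h
        have e : (2 * h + 2 + 2) / 2 = h + 2 := by omega
        apply ih (2 * h + 2) (by omega)
        · rw [e]; exact hlt
        · omega
      · next hge =>
        exact ⟨by omega, hinv, by omega⟩
  exact H (t - h) h le_rfl hinv heven

theorem pvBsearch_eq (t : Nat) (lo hi : Nat) (h2 : 2 ≤ lo) (hlh : lo ≤ hi)
    (hhi : t ≤ Nat.fib hi) (hlo : ∀ m, 2 ≤ m → m < lo → Nat.fib m < t) :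
    pvBsearch t lo hi = pvMinIdx t := by
  have H : ∀ k lo hi, hi - lo ≤ k → 2 ≤ lo → lo ≤ hi → t ≤ Nat.fib hi →
      (∀ m, 2 ≤ m → m < lo → Nat.fib m < t) → pvBsearch t lo hi = pvMinIdx t := by
    intro k
    induction k with
    | zero =>
      intro lo hi hk h2 hlh hhi hlo
      have : lo = hi := by omega
      subst this
      unfold pvBsearch
      rw [if_neg (by omega)]
      exact (pvMinIdx_unique t lo h2 hhi hlo).symm
    | succ k ih =>
      intro lo hi hk h2 hlh hhi hlo
      unfold pvBsearch
      split
      · next hlth =>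
        simp only [pvFd_eq]
        split
        · next hlt =>
          apply ih ((lo + hi) / 2 + 1) hi (by omega) (by omega) (by omega) hhi
          intro m hm2 hmlt
          calc Nat.fib m ≤ Nat.fib ((lo + hi) / 2) := Nat.fib_mono (by omega)
            _ < t := hlt
        · next hge =>
          exact ih lo ((lo + hi) / 2) (by omega) h2 (by omega) (by omega) hlo
      · next hge =>
        have : lo = hi := by omega
        subst this
        exact (pvMinIdx_unique t lo h2 hhi hlo).symm
  exact H (hi - lo) lo hi le_rfl h2 hlh hhi hlo

-- ===== VERDICT (by name: the statement is the Claim_ definition above) =====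
theorem first_fib_num_to_have_x_digits_spec : Claim_equal_first_fib_num_to_have_x_digits := by
  intro x _
  unfold Spec_first_fib_num_to_have_x_digits
  unfold first_fib_num_to_have_x_digits first_fib_num_to_have_x_digits_alt
  by_cases hx : x ≤ 1
  · rw [if_pos hx]
    by_cases h1 : 1 ≤ x
    · have hx1 : x = 1 := le_antisymm hx h1
      subst hx1
      have hL : pvLoopA (if (1 : Int) ≤ 1 then 10 ^ ((1 : Int) - 1).toNat else 0) 0 0 2
          = (2, 1) := by
        rw [if_pos (le_refl (1 : Int))]
        norm_num
        unfold pvLoopA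
        norm_num
      simp only [hL]
      decide
    · rw [if_neg h1]
      have hL : pvLoopA 0 0 0 2 = (2, 1) := by
        unfold pvLoopA
        norm_num
      simp only [hL]
      decide
  · rw [if_neg hx]
    rw [if_pos (show (1:Int) ≤ x by omega)]
    obtain ⟨e, he, he1⟩ : ∃ e : Nat, (x - 1).toNat = e ∧ 1 ≤ e :=
      ⟨(x - 1).toNat, rfl, by omega⟩
    simp only [he]
    have ht10 : 10 ≤ 10 ^ e := by
      calc (10 : Nat) = 10 ^ 1 := by norm_num
        _ ≤ 10 ^ e := Nat.pow_le_pow_right (by norm_num) he1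
    have hA := pvLoopA_eq (10 ^ e) 0 0 2 (by norm_num) (by decide) (by decide) (by omega)
    obtain ⟨hhi1, hhi2, hhi3⟩ := pvExpS_spec (10 ^ e) 0
      (by show Nat.fib ((0 + 2) / 2) < _; norm_num [Nat.fib]; omega) rfl
    have hhige : 4 ≤ pvExpS (10 ^ e) 0 := by
      rcases Nat.lt_or_ge (pvExpS (10 ^ e) 0) 4 with h | h
      · exfalso
        have hfib : Nat.fib (pvExpS (10 ^ e) 0) ≤ 2 := by
          interval_cases (pvExpS (10 ^ e) 0) <;> decide
        omega
      · exact h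
    have hB := pvBsearch_eq (10 ^ e) (pvExpS (10 ^ e) 0 / 2) (pvExpS (10 ^ e) 0)
      (by omega) (by omega) hhi1 ?_
    · simp only [hA, hB, pvFd_eq]
    · intro m hm2 hmlt
      exact lt_of_le_of_lt (Nat.fib_mono (by omega : m ≤ pvExpS (10 ^ e) 0 / 2)) hhi2
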